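-- pv_equiv track=rewrite | github.com/pigeongcc/provectusTestTask | Algorithms and Data Structures/task1.py | count_connections
-- ===== SOURCE A (Python) =====
-- def count_connections(list1: list, list2: list) -> int:
--     count = 0
--     dict1 = {}
--     dict2 = {}
--
--     # initializing dictionaries
--
--     for i in list1:                         # O(list1_size)
--         dict1.setdefault(i, 0)
--         dict2.setdefault(i, 0)
--
--     for i in list2:                         # O(list2_size)
--         dict2.setdefault(i, 0)
--
--     # counting number of entries for each list value
--
--     for i in list1:                         # O(list1_size)
--         dict1[i] += 1
--
--     for i in list2:                         # O(list2_size)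
--         dict2[i] += 1
--
--     # here we make dict[i] equals to num of connections for i value if there are pairs,
--     # or to 0 if there are no connections for i value
--
--     for i in dict1.keys():                  # O(list1_size)
--         dict1[i] *= dict2[i]
--
--         count += dict1[i]
--
--     return count
-- ===== SOURCE B (Python) =====
-- def count_connections(list1: list, list2: list) -> int:
--     total = 0
--     for x in list1:
--         total += list2.count(x)
--     return total
-- ===== Notes on version B (the rewrite author's own statement) =====
-- stated objective: simpler
-- what changed: Drops all three dictionaries and the key-merging passes: B just rescans list2 for each element of list1, summing list2.count(x); no frequency table is ever built.
import Mathlib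
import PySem

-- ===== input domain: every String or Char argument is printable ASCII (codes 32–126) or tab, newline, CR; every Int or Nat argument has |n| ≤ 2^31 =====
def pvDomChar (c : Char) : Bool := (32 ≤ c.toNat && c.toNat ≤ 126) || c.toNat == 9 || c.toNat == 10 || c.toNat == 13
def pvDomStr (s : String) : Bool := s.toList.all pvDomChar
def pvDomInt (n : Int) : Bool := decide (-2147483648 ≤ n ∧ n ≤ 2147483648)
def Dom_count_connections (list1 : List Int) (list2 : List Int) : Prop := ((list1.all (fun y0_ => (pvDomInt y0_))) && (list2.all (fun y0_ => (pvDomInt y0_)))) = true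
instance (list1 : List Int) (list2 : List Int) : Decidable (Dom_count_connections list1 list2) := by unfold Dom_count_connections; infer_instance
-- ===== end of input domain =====

-- B drops A's three dictionaries: it just rescans list2 for each element of list1 and sums the counts (simpler, same return value).

-- ===== PORT A =====
-- Literal transliteration of A: two setdefault passes, two increment passes, then a pass
-- over dict1's keys multiplying by dict2's entry and accumulating.  The Python subscripts
-- dict1[i] / dict2[i] are ported with default 0; this is exact because every key read or
-- incremented was inserted by the setdefault passes, so a KeyError never occurs in A.
def count_connections (list1 : List Int) (list2 : List Int) : Int :=
  let dict1 : PySem.Dict Int Int := PySem.Dict.empty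
  let dict2 : PySem.Dict Int Int := PySem.Dict.empty
  -- for i in list1: dict1.setdefault(i, 0); dict2.setdefault(i, 0)
  let p := list1.foldl (fun (p : PySem.Dict Int Int × PySem.Dict Int Int) i =>
    (p.1.setdefault i 0, p.2.setdefault i 0)) (dict1, dict2)
  let dict1 := p.1
  let dict2 := p.2
  -- for i in list2: dict2.setdefault(i, 0)
  let dict2 := list2.foldl (fun d i => d.setdefault i 0) dict2
  -- for i in list1: dict1[i] += 1
  let dict1 := list1.foldl (fun d i => d.modify i 0 (· + 1)) dict1
  -- for i in list2: dict2[i] += 1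
  let dict2 := list2.foldl (fun d i => d.modify i 0 (· + 1)) dict2
  -- for i in dict1.keys(): dict1[i] *= dict2[i]; count += dict1[i]
  let q := dict1.keys.foldl (fun (q : PySem.Dict Int Int × Int) i =>
    let d := q.1.modify i 0 (fun v => v * dict2.getD i 0)
    (d, q.2 + d.getD i 0)) (dict1, 0)
  q.2

-- ===== PORT B =====
-- total = 0; for x in list1: total += list2.count(x); return total
def count_connections_alt (list1 : List Int) (list2 : List Int) : Int :=
  list1.foldl (fun total x => total + (PySem.List.count list2 x : Int)) 0

-- ===== PRECONDITION & SPEC =====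
def Spec_count_connections (list1 : List Int) (list2 : List Int) (out : Int) : Prop := out = count_connections_alt list1 list2
instance (list1 : List Int) (list2 : List Int) (out : Int) : Decidable (Spec_count_connections list1 list2 out) := by unfold Spec_count_connections; infer_instance

-- ===== CLAIM (what is proved, stated in full; the proofs are below) =====
def Claim_equal_count_connections : Prop := ∀ (list1 : List Int) (list2 : List Int), Dom_count_connections list1 list2 → Spec_count_connections list1 list2 (count_connections list1 list2)

-- ===== LEMMAS AND PROOFS =====

-- the first loop updates the two dicts independently: split the pair foldl componentwise
theorem pv_sd_pair_fst (l : List Int) (a b : PySem.Dict Int Int) :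
    (l.foldl (fun (p : PySem.Dict Int Int × PySem.Dict Int Int) i =>
      (p.1.setdefault i 0, p.2.setdefault i 0)) (a, b)).1
      = l.foldl (fun d i => d.setdefault i 0) a := by
  induction l generalizing a b with
  | nil => rfl
  | cons x xs ih => simp only [List.foldl_cons, ih]

theorem pv_sd_pair_snd (l : List Int) (a b : PySem.Dict Int Int) :
    (l.foldl (fun (p : PySem.Dict Int Int × PySem.Dict Int Int) i =>
      (p.1.setdefault i 0, p.2.setdefault i 0)) (a, b)).2
      = l.foldl (fun d i => d.setdefault i 0) b := by
  induction l generalizing a b with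
  | nil => rfl
  | cons x xs ih => simp only [List.foldl_cons, ih]

-- a setdefault-with-0 loop keeps every getD-with-0 lookup equal to 0
theorem pv_sd_getD (l : List Int) (d : PySem.Dict Int Int)
    (h : ∀ k, d.getD k 0 = 0) (k : Int) :
    (l.foldl (fun d i => d.setdefault i 0) d).getD k 0 = 0 := by
  induction l generalizing d with
  | nil => exact h k
  | cons x xs ih =>
    simp only [List.foldl_cons]
    apply ih
    intro j
    by_cases hc : d.contains x = true
    · rw [PySem.Dict.setdefault_of_contains d 0 hc]; exact h j
    · rw [PySem.Dict.setdefault_of_not_contains d 0 (by simpa using hc)]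
      rw [PySem.Dict.getD_insert]
      split_ifs with hjx
      · rfl
      · exact h j

-- a setdefault loop keeps the keys Nodup
theorem pv_sd_nodup (l : List Int) (d : PySem.Dict Int Int)
    (h : d.keys.Nodup) :
    (l.foldl (fun d i => d.setdefault i 0) d).keys.Nodup := by
  induction l generalizing d with
  | nil => exact h
  | cons x xs ih =>
    simp only [List.foldl_cons]
    apply ih
    by_cases hc : d.contains x = true
    · rw [PySem.Dict.setdefault_of_contains d 0 hc]; exact h
    · rw [PySem.Dict.setdefault_of_not_contains d 0 (by simpa using hc)]
      exact PySem.Dict.nodup_keys_insert d x 0 h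

-- A's final loop: over Nodup keys the accumulated count is the sum of getD·weight
theorem pv_final_loop (w : Int → Int) (K : List Int) (d : PySem.Dict Int Int) (c : Int)
    (hnd : K.Nodup) :
    (K.foldl (fun (q : PySem.Dict Int Int × Int) i =>
        (q.1.modify i 0 (fun v => v * w i),
         q.2 + (q.1.modify i 0 (fun v => v * w i)).getD i 0)) (d, c)).2
      = c + (K.map (fun i => d.getD i 0 * w i)).sum := by
  induction K generalizing d c with
  | nil => simp
  | cons x xs ih =>
    have hx : x ∉ xs := (List.nodup_cons.mp hnd).1
    simp only [List.foldl_cons, List.map_cons, List.sum_cons]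
    rw [PySem.Dict.getD_modify_self]
    rw [ih _ _ (List.nodup_cons.mp hnd).2]
    have hmap : xs.map (fun i => (d.modify x 0 (fun v => v * w x)).getD i 0 * w i)
        = xs.map (fun i => d.getD i 0 * w i) := by
      apply List.map_congr_left
      intro j hj
      have hne : j ≠ x := by rintro rfl; exact hx hj
      rw [PySem.Dict.getD_modify_of_ne d 0 _ hne]
    rw [hmap]; ring

-- sum of (if i = x then g i else 0) over a Nodup list containing x is g x
theorem pv_sum_ite (g : Int → Int) (x : Int) (K : List Int)
    (hnd : K.Nodup) (hx : x ∈ K) :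
    (K.map (fun i => if i = x then g i else 0)).sum = g x := by
  induction K with
  | nil => cases hx
  | cons y ys ih =>
    simp only [List.map_cons, List.sum_cons]
    rcases List.mem_cons.mp hx with rfl | hmem
    · have hy : x ∉ ys := (List.nodup_cons.mp hnd).1
      have hz : (ys.map (fun i => if i = x then g i else 0)).sum = 0 := by
        rw [List.sum_eq_zero]
        intro z hzz
        rcases List.mem_map.mp hzz with ⟨i, hi, rfl⟩
        have hne : i ≠ x := by rintro rfl; exact hy hi
        simp [hne]
      simp [hz]
    · have hyx : y ≠ x := by rintro rfl; exact (List.nodup_cons.mp hnd).1 hmem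
      rw [ih (List.nodup_cons.mp hnd).2 hmem]
      simp [hyx]

-- a plain sum over l regrouped as a count-weighted sum over any Nodup superset of l's elements
theorem pv_sum_count (g : Int → Int) (l : List Int) (K : List Int)
    (hnd : K.Nodup) (hsub : ∀ x ∈ l, x ∈ K) :
    (l.map g).sum = (K.map (fun i => (List.count i l : Int) * g i)).sum := by
  induction l with
  | nil => simp
  | cons x xs ih =>
    simp only [List.map_cons, List.sum_cons]
    rw [ih (fun y hy => hsub y (List.mem_cons_of_mem x hy))]
    have hsplit : (K.map (fun i => (List.count i (x :: xs) : Int) * g i)).sum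
        = (K.map (fun i => (List.count i xs : Int) * g i)).sum
          + (K.map (fun i => if i = x then g i else 0)).sum := by
      rw [← PySem.List.sum_map_add_int]
      apply congrArg
      apply List.map_congr_left
      intro j _
      rw [List.count_cons]
      push_cast
      by_cases hjx : j = x
      · subst hjx; simp; ring
      · have hxj : (x == j) = false := beq_eq_false_iff_ne.mpr (fun h => hjx h.symm)
        simp [hxj, hjx]
    rw [hsplit, pv_sum_ite g x K hnd (hsub x (by simp))]
    ring

-- the two ports agree
theorem pv_unfolds (list1 list2 : List Int) :
    count_connections list1 list2 = count_connections_alt list1 list2 := by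
  unfold count_connections
  simp only [pv_sd_pair_fst, pv_sd_pair_snd]
  set d1a := list1.foldl (fun d i => d.setdefault i 0) (PySem.Dict.empty : PySem.Dict Int Int) with hd1a
  set d2a := list2.foldl (fun d i => d.setdefault i 0) d1a with hd2a
  set d1 := list1.foldl (fun d i => d.modify i 0 (· + 1)) d1a with hd1
  set d2 := list2.foldl (fun d i => d.modify i 0 (· + 1)) d2a with hd2
  have h1a0 : ∀ k, d1a.getD k 0 = 0 := fun k =>
    pv_sd_getD list1 _ (fun j => PySem.Dict.getD_empty j 0) k
  have h2a0 : ∀ k, d2a.getD k 0 = 0 := fun k =>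
    pv_sd_getD list2 _ h1a0 k
  have h1 : ∀ k, d1.getD k 0 = (List.count k list1 : Int) := by
    intro k
    rw [hd1, PySem.Dict.getD_foldl_modify_add_one, h1a0 k]
    ring
  have h2 : ∀ k, d2.getD k 0 = (List.count k list2 : Int) := by
    intro k
    rw [hd2, PySem.Dict.getD_foldl_modify_add_one, h2a0 k]
    ring
  have hKnd : d1.keys.Nodup := by
    rw [hd1]
    exact PySem.Dict.nodup_keys_foldl_modify_key list1 id 0 (fun _ _ => (· + 1)) d1a
      (pv_sd_nodup list1 _ (by simp [PySem.Dict.keys_empty]))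
  have hKmem : ∀ x ∈ list1, x ∈ d1.keys := by
    intro x hx
    rw [hd1, PySem.Dict.keys_foldl_modify]
    exact (PySem.Set.mem_update _ _ _).mpr (Or.inr hx)
  rw [pv_final_loop (fun i => d2.getD i 0) d1.keys d1 0 hKnd]
  unfold count_connections_alt
  rw [PySem.List.foldl_add]
  have hcnt : list1.map (fun x => (PySem.List.count list2 x : Int))
      = list1.map (fun x => (List.count x list2 : Int)) := by
    apply List.map_congr_left
    intro x _
    rw [PySem.List.count_eq]
  rw [hcnt, pv_sum_count (fun x => (List.count x list2 : Int)) list1 d1.keys hKnd hKmem]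
  simp only [h1, h2]

-- ===== VERDICT (by name: the statement is the Claim_ definition above) =====
theorem count_connections_spec : Claim_equal_count_connections := by
  intro list1 list2 _
  unfold Spec_count_connections
  exact pv_unfolds list1 list2
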